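-- pv_equiv track=rewrite | github.com/abitabir/ScaleyStuffs | uni/SOF1/Practicals/Practical 8 - 01.11.2019/exercise 1.py | basket_price
-- ===== SOURCE A (Python) =====
-- def basket_price(basket, stock, prices):
--     given_basket_price = 0
--     for fruit in basket.keys():
--         if (fruit not in prices
--             or fruit not in stock
--             or stock[fruit] < basket[fruit]):
--             return(-1)
--         else:
--             given_basket_price += basket[fruit] * prices[fruit]
--     return(given_basket_price)
-- ===== SOURCE B (Python) =====
-- def basket_price(basket, stock, prices):
--     def total(items):
--         # recursion over the basket's (fruit, qty) items; None signals unavailability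
--         if not items:
--             return 0
--         (fruit, qty), rest = items[0], items[1:]
--         if fruit not in prices or fruit not in stock or stock[fruit] < qty:
--             return None
--         sub = total(rest)
--         return None if sub is None else qty * prices[fruit] + sub
--
--     result = total(list(basket.items()))
--     return -1 if result is None else result
-- ===== Notes on version B (the rewrite author's own statement) =====
-- stated objective: alternative
-- what changed: Replaced A's iterative fused loop over basket.keys() with dict lookups and an early-return -1 sentinel by a structural recursion over the basket's (fruit, qty) items that returns Option-style None on failure and builds the sum back-to-front on return, with -1 applied once at the end.
import Mathlib
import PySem

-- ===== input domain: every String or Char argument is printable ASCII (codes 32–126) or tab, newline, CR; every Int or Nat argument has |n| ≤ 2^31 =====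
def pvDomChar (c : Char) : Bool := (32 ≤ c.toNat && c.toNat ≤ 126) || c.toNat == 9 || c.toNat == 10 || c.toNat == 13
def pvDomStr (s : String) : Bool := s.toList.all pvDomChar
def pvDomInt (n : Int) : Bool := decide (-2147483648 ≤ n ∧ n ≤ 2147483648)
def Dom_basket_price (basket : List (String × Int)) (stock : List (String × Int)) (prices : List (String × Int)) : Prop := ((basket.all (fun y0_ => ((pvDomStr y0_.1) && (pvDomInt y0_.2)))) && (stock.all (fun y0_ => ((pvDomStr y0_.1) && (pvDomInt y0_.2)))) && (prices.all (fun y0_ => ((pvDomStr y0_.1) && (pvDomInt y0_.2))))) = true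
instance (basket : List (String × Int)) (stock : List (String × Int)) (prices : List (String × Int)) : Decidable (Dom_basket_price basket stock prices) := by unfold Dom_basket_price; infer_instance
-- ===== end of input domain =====

-- B replaces A's iterative keys-loop (early-return -1, forward accumulator, dict lookups for
-- quantities) by a structural recursion over the basket's (fruit, qty) items that signals
-- failure with Option none and builds the sum on return ("alternative"; same O(n) cost).

-- ===== PORT A =====
-- A's fused loop: walk basket.keys(), bail out with -1 on the first unavailable/short
-- fruit, otherwise add basket[f] * prices[f] into the running accumulator
def basketA_loop (basket : List (String × Int)) (stock : List (String × Int))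
    (prices : List (String × Int)) : List String → Int → Int
  | [], acc => acc
  | f :: rest, acc =>
    if (prices.lookup f).isNone || (stock.lookup f).isNone
        || decide ((stock.lookup f).getD 0 < (basket.lookup f).getD 0) then
      -1
    else
      basketA_loop basket stock prices rest
        (acc + (basket.lookup f).getD 0 * (prices.lookup f).getD 0)

def basket_price (basket : List (String × Int)) (stock : List (String × Int)) (prices : List (String × Int)) : Int :=
  basketA_loop basket stock prices (basket.map Prod.fst) 0

-- ===== PORT B =====
-- Source B's recursive helper `total`: none = Python None (unavailable fruit)
def basketB_total (stock : List (String × Int)) (prices : List (String × Int)) :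
    List (String × Int) → Option Int
  | [] => some 0
  | (fruit, qty) :: rest =>
    if (prices.lookup fruit).isNone || (stock.lookup fruit).isNone
        || decide ((stock.lookup fruit).getD 0 < qty) then
      none
    else
      match basketB_total stock prices rest with
      | none => none
      | some sub => some (qty * (prices.lookup fruit).getD 0 + sub)

def basket_price_alt (basket : List (String × Int)) (stock : List (String × Int)) (prices : List (String × Int)) : Int :=
  match basketB_total stock prices basket with
  | none => -1
  | some result => result

-- ===== PRECONDITION & SPEC =====
-- In Python `basket` is a dict, so its keys are necessarily distinct; an association list
-- with a duplicated basket key represents no dict input, and there A's key-based lookups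
-- and B's item-based recursion may legitimately disagree. Pre_ restricts to dict-shaped
-- baskets (it excludes no input the Python A can actually receive).
def Pre_basket_price (basket : List (String × Int)) (stock : List (String × Int)) (prices : List (String × Int)) : Prop :=
  (basket.map Prod.fst).Nodup
instance (basket : List (String × Int)) (stock : List (String × Int)) (prices : List (String × Int)) : Decidable (Pre_basket_price basket stock prices) := by unfold Pre_basket_price; infer_instance

def pvWitness_basket_price : (List (String × Int)) × (List (String × Int)) × (List (String × Int)) :=
  ([("apple", 2), ("pear", 1)], [("apple", 5), ("pear", 3)], [("apple", 4), ("pear", 7)])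

def Spec_basket_price (basket : List (String × Int)) (stock : List (String × Int)) (prices : List (String × Int)) (out : Int) : Prop := out = basket_price_alt basket stock prices
instance (basket : List (String × Int)) (stock : List (String × Int)) (prices : List (String × Int)) (out : Int) : Decidable (Spec_basket_price basket stock prices out) := by unfold Spec_basket_price; infer_instance

-- ===== CLAIM (what is proved, stated in full; the proofs are below) =====
def Claim_equal_basket_price : Prop := ∀ (basket : List (String × Int)) (stock : List (String × Int)) (prices : List (String × Int)), Dom_basket_price basket stock prices → Pre_basket_price basket stock prices → Spec_basket_price basket stock prices (basket_price basket stock prices)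

-- ===== LEMMAS AND PROOFS =====

-- with distinct keys, looking an item's key up in the basket gives that item's value
lemma lookup_of_mem_nodup : ∀ (l : List (String × Int)), (l.map Prod.fst).Nodup →
    ∀ p ∈ l, l.lookup p.1 = some p.2 := by
  intro l
  induction l with
  | nil => intro _ p hp; simp at hp
  | cons q rest ih =>
    intro hnd p hp
    simp only [List.map_cons, List.nodup_cons] at hnd
    rw [List.mem_cons] at hp
    rcases hp with rfl | hp
    · simp [List.lookup]
    · have hne : (p.1 == q.1) = false := by
        refine beq_eq_false_iff_ne.mpr (fun h => hnd.1 ?_)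
        exact h ▸ List.mem_map_of_mem hp
      rw [List.lookup, hne]
      exact ih hnd.2 p hp
  
-- A's forward loop over the keys of `items` equals B's recursion over `items`, provided
-- every item's key looks up to its own value in the full basket
lemma basketA_loop_eq_B (basket stock prices : List (String × Int)) :
    ∀ (items : List (String × Int)) (acc : Int),
      (∀ p ∈ items, basket.lookup p.1 = some p.2) →
      basketA_loop basket stock prices (items.map Prod.fst) acc =
        match basketB_total stock prices items with
        | none => -1
        | some s => acc + s := by
  intro items
  induction items with
  | nil => intro acc _; simp [basketA_loop, basketB_total]
  | cons p rest ih =>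
    intro acc hmem
    obtain ⟨f, q⟩ := p
    have hb : basket.lookup f = some q := hmem (f, q) (List.mem_cons_self)
    by_cases hbad : ((prices.lookup f).isNone || (stock.lookup f).isNone
        || decide ((stock.lookup f).getD 0 < q)) = true
    · simp only [List.map_cons, basketA_loop, basketB_total, hb, Option.getD_some]
      rw [if_pos hbad, if_pos hbad]
    · simp only [List.map_cons, basketA_loop, basketB_total, hb, Option.getD_some]
      rw [if_neg hbad, if_neg hbad]
      rw [ih _ (fun p hp => hmem p (List.mem_cons_of_mem _ hp))]
      cases basketB_total stock prices rest with
      | none => rfl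
      | some s => simp; ring

-- ===== VERDICT (by name: the statement is the Claim_ definition above) =====
theorem basket_price_spec : Claim_equal_basket_price := by
  intro basket stock prices _ hpre
  unfold Spec_basket_price basket_price basket_price_alt
  rw [basketA_loop_eq_B basket stock prices basket 0
      (lookup_of_mem_nodup basket hpre)]
  cases basketB_total stock prices basket with
  | none => rfl
  | some s => simp
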